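-- pv_equiv track=rewrite | github.com/ewoij/aoc | 2025/day/03/sol1.py | largest
-- ===== SOURCE A (Python) =====
-- def largest(arr: list[int]):
--     max_ = arr[0]
--     res = 0
--     for v in arr[1:]:
--         r = max_ * 10 + v
--         if r > res:
--             res = r
--         if v > max_:
--             max_ = v
--     return res
-- ===== SOURCE B (Python) =====
-- def largest(arr: list[int]):
--     if not arr:
--         return 0
--     pm = [arr[0]]
--     for v in arr[1:]:
--         pm.append(max(pm[-1], v))
--     return max([0] + [p * 10 + v for p, v in zip(pm, arr[1:])])
-- ===== Notes on version B (the rewrite author's own statement) =====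
-- stated objective: alternative
-- what changed: Two-pass decomposition: build the prefix-maxima list first, then take the max of 0 and the zipped candidates pm*10+v, instead of A's single fused loop with conditional running-max and running-result updates.
-- crash fix: On the empty list A raises IndexError (arr[0]); B returns 0. — e.g. on largest([]): A raises IndexError, B returns 0
import Mathlib
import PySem

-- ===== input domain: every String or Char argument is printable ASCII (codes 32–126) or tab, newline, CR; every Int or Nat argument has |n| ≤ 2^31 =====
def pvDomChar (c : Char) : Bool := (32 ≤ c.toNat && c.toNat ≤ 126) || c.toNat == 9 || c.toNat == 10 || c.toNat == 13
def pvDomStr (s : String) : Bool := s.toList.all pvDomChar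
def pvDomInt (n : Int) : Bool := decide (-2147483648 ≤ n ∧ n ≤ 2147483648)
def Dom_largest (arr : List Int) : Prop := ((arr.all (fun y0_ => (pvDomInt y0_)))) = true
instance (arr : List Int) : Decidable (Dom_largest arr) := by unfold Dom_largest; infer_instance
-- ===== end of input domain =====

-- B is an alternative decomposition (prefix-maxima list + zipped candidates + one max), not faster; equivalence is on return values.

-- ===== PORT A =====
def largest (arr : List Int) : Int :=
  match PySem.List.pyGet? arr 0 with
  | none => 0  -- arr[0] raises IndexError here; excluded by Pre_largest
  | some a0 =>
    ((PySem.List.slice arr (some 1) none).foldl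
      (fun (st : Int × Int) v =>
        let r := st.1 * 10 + v
        let res := if r > st.2 then r else st.2
        let m := if v > st.1 then v else st.1
        (m, res)) (a0, 0)).2

-- ===== PORT B =====
def largest_alt (arr : List Int) : Int :=
  match arr with
  | [] => 0
  | a :: _ =>
    let t := PySem.List.slice arr (some 1) none
    let st := t.foldl (fun (st : List Int × Int) v =>
        let m := max st.2 v
        (st.1 ++ [m], m)) ([a], a)
    let cands := (st.1.zip t).map (fun pv => pv.1 * 10 + pv.2)
    (PySem.List.max? ((0 : Int) :: cands) (fun y => y)).getD 0

-- ===== PRECONDITION & SPEC =====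
-- Pre_ excludes only the empty list, on which A raises IndexError (arr[0]).
def Pre_largest (arr : List Int) : Prop := arr ≠ []
instance (arr : List Int) : Decidable (Pre_largest arr) := by unfold Pre_largest; infer_instance
def pvWitness_largest : List Int := ([3, 1, 4])

-- On the empty list A raises IndexError (arr[0]); B returns 0.
def Raises_largest (arr : List Int) : Prop := arr = []
instance (arr : List Int) : Decidable (Raises_largest arr) := by unfold Raises_largest; infer_instance
def pvRaiseWitness_largest : List Int := ([])
def pvRaiseWitnessOut_largest : Int := 0

def Spec_largest (arr : List Int) (out : Int) : Prop := out = largest_alt arr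
instance (arr : List Int) (out : Int) : Decidable (Spec_largest arr out) := by unfold Spec_largest; infer_instance

-- ===== CLAIM (what is proved, stated in full; the proofs are below) =====
def Claim_equal_largest : Prop := ∀ (arr : List Int), Dom_largest arr → Pre_largest arr → Spec_largest arr (largest arr)
def Claim_raises_largest : Prop := (∀ (arr : List Int), Dom_largest arr → Raises_largest arr → ¬ Pre_largest arr) ∧ (Dom_largest (pvRaiseWitness_largest) ∧ Raises_largest (pvRaiseWitness_largest) ∧ largest_alt (pvRaiseWitness_largest) = pvRaiseWitnessOut_largest)

-- ===== LEMMAS AND PROOFS =====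

-- running prefix maxima after each element (what B's loop appends)
def pvScanMax (m : Int) : List Int → List Int
  | [] => []
  | v :: t => max m v :: pvScanMax (max m v) t

-- candidate values prefmax*10 + v (what both programs maximise over)
def pvCands (m : Int) : List Int → List Int
  | [] => []
  | v :: t => (m * 10 + v) :: pvCands (max m v) t

theorem foldA_eq (t : List Int) (m r : Int) :
    t.foldl (fun (st : Int × Int) v =>
        let r := st.1 * 10 + v
        let res := if r > st.2 then r else st.2
        let m := if v > st.1 then v else st.1
        (m, res)) (m, r)
      = (t.foldl max m, (pvCands m t).foldl max r) := by
  induction t generalizing m r with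
  | nil => simp [pvCands]
  | cons v t ih =>
    simp only [List.foldl_cons, pvCands]
    have h1 : (if v > m then v else m) = max m v := by split <;> omega
    have h2 : (if m * 10 + v > r then m * 10 + v else r) = max r (m * 10 + v) := by
      split <;> omega
    rw [h1, h2, ih]

theorem foldB_eq (t : List Int) (m : Int) (acc : List Int) :
    t.foldl (fun (st : List Int × Int) v =>
        let m := max st.2 v
        (st.1 ++ [m], m)) (acc, m)
      = (acc ++ pvScanMax m t, t.foldl max m) := by
  induction t generalizing m acc with
  | nil => simp [pvScanMax]
  | cons v t ih =>
    simp only [List.foldl_cons, pvScanMax]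
    rw [ih]
    simp

theorem zip_cands (t : List Int) (m : Int) :
    ((m :: pvScanMax m t).zip t).map (fun pv => pv.1 * 10 + pv.2) = pvCands m t := by
  induction t generalizing m with
  | nil => simp [pvCands]
  | cons v t ih =>
    simp only [pvScanMax, pvCands, List.zip_cons_cons, List.map_cons]
    exact congrArg _ (ih (max m v))

theorem largest_cons (a : Int) (t : List Int) :
    largest (a :: t) = (pvCands a t).foldl max 0 := by
  simp only [largest, PySem.List.pyGet?, PySem.List.pyIdx?, PySem.List.slice_from_one,
    List.tail_cons]
  simp [foldA_eq]

theorem largest_alt_cons (a : Int) (t : List Int) :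
    largest_alt (a :: t) = (pvCands a t).foldl max 0 := by
  simp only [largest_alt, PySem.List.slice_from_one, List.tail_cons, foldB_eq,
    List.singleton_append, zip_cands, PySem.List.max?_id_cons, Option.getD_some]

-- ===== VERDICT (by name: the statement is the Claim_ definition above) =====
theorem largest_spec : Claim_equal_largest := by
  intro arr _ hpre
  unfold Spec_largest
  cases arr with
  | nil => exact absurd rfl hpre
  | cons a t => rw [largest_cons, largest_alt_cons]

@[simp] theorem largest_raises : Claim_raises_largest := by
  unfold Claim_raises_largest
  exact ⟨fun arr _ h => by simp [Raises_largest] at h; simp [Pre_largest, h], by decide⟩
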